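-- pv_equiv track=rewrite | github.com/BrettRey/erdos-problem-993 | experiment_families.py | build_broom
-- ===== SOURCE A (Python) =====
-- def build_broom(s, p):
--     """Broom: star with s leaves, one arm of length p."""
--     n = 1 + s + p
--     adj = [[] for _ in range(n)]
--     # Hub is vertex 0
--     for i in range(1, s + 1):
--         adj[0].append(i)
--         adj[i].append(0)
--     # Path from hub
--     prev = 0
--     for i in range(s + 1, n):
--         adj[prev].append(i)
--         adj[i].append(prev)
--         prev = i
--     return n, adj
-- ===== SOURCE B (Python) =====
-- def build_broom(s, p):
--     """Broom: star with s leaves, one arm of length p.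
--
--     Closed form: each vertex's neighbor list is computed directly from its
--     role (hub / leaf / path vertex), with no incremental appends."""
--     n = 1 + s + p
--
--     def neighbors(v):
--         if v == 0:
--             return list(range(1, s + 1)) + ([s + 1] if p >= 1 else [])
--         if v <= s:
--             return [0]
--         return [0 if v == s + 1 else v - 1] + ([v + 1] if v < n - 1 else [])
--
--     return n, [neighbors(v) for v in range(n)]
-- ===== Notes on version B (the rewrite author's own statement) =====
-- stated objective: alternative
-- what changed: B computes each vertex's neighbor list directly in closed form from the vertex's role (hub / leaf / path vertex) and maps it over range(n), instead of A's incremental mutation of an adjacency array by paired appends with a carried prev vertex.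
-- outside the precondition, e.g. on build_broom(-1, 2): A returns (2, [[0, 0, 1], [0]]), B returns (2, [[0], [0]])
import Mathlib
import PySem

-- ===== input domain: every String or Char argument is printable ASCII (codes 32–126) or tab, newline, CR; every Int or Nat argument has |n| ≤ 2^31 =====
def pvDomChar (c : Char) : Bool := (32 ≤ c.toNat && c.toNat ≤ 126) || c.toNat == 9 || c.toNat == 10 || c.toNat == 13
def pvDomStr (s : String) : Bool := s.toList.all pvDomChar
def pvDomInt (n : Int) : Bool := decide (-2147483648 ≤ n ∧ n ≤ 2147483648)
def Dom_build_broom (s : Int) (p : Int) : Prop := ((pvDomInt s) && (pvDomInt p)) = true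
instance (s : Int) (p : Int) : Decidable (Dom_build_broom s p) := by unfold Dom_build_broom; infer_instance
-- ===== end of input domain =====

-- B replaces A's incremental append-based construction by a closed-form per-vertex
-- neighbor formula mapped over range(n); same cost, different algorithm.

-- Python's adj[idx].append(x) on a list of lists (arrays, like CPython's lists);
-- exact for -len ≤ idx < len (Python's negative-index wraparound).
def pyAppendAt (adj : Array (Array Int)) (idx : Int) (x : Int) : Array (Array Int) :=
  let j : Int := if idx < 0 then idx + adj.size else idx
  adj.modify j.toNat (fun l => l.push x)

-- ===== PORT A =====
def build_broom (s : Int) (p : Int) : Int × List (List Int) :=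
  let n := 1 + s + p
  let adj : Array (Array Int) := ((PySem.List.pyRange 0 n 1).map (fun _ => (#[] : Array Int))).toArray
  let adj := (PySem.List.pyRange 1 (s+1) 1).foldl
      (fun adj i => pyAppendAt (pyAppendAt adj 0 i) i 0) adj
  let st := (PySem.List.pyRange (s+1) n 1).foldl
      (fun (st : Array (Array Int) × Int) i =>
        (pyAppendAt (pyAppendAt st.1 st.2 i) i st.2, i)) (adj, 0)
  (n, st.1.toList.map Array.toList)

-- ===== PORT B =====
def build_broom_alt (s : Int) (p : Int) : Int × List (List Int) :=
  let n := 1 + s + p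
  let neighbors : Int → List Int := fun v =>
    if v = 0 then
      PySem.List.pyRange 1 (s+1) 1 ++ (if p ≥ 1 then [s+1] else [])
    else if v ≤ s then [(0 : Int)]
    else (if v = s + 1 then (0 : Int) else v - 1) ::
         (if v < n - 1 then [v+1] else [])
  (n, (PySem.List.pyRange 0 n 1).map neighbors)

-- ===== PRECONDITION & SPEC =====
-- Pre_ excludes (a) inputs where A raises IndexError (s ≥ 1 with p < 0, etc.) and
-- (b) inputs with exactly one of s, p negative on which A still returns: there A's
-- negative-index wraparound and hub self-loop appends produce accidental adjacency
-- values outside the function's purpose (a broom has nonnegative leaf/arm counts).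
def Pre_build_broom (s : Int) (p : Int) : Prop :=
  (0 ≤ s ∧ 0 ≤ p) ∨ (s ≤ 0 ∧ p ≤ 0)
instance (s : Int) (p : Int) : Decidable (Pre_build_broom s p) := by
  unfold Pre_build_broom; infer_instance
def pvWitness_build_broom : Int × Int := (2, 3)

def Spec_build_broom (s : Int) (p : Int) (out : Int × List (List Int)) : Prop := out = build_broom_alt s p
instance (s : Int) (p : Int) (out : Int × List (List Int)) : Decidable (Spec_build_broom s p out) := by unfold Spec_build_broom; infer_instance

-- ===== CLAIM (what is proved, stated in full; the proofs are below) =====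
def Claim_equal_build_broom : Prop := ∀ (s : Int) (p : Int), Dom_build_broom s p → Pre_build_broom s p → Spec_build_broom s p (build_broom s p)

-- ===== LEMMAS AND PROOFS =====

-- proof-side List model of pyAppendAt (same computation on cons-lists)
def pyAppendAtL (adj : List (List Int)) (idx : Int) (x : Int) : List (List Int) :=
  let j : Int := if idx < 0 then idx + adj.length else idx
  adj.modify j.toNat (fun l => l ++ [x])

-- the array state seen as a list of lists
def absA (a : Array (Array Int)) : List (List Int) := a.toList.map Array.toList

theorem map_modify {α β : Type} (f : α → β) (g : α → α) (h : β → β)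
    (comm : ∀ x, f (g x) = h (f x)) :
    ∀ (l : List α) (i : Nat), (l.modify i g).map f = (l.map f).modify i h := by
  intro l i
  apply List.ext_getElem?
  intro j
  simp only [List.getElem?_map, List.getElem?_modify]
  cases l[j]? with
  | none => rfl
  | some a =>
      by_cases hij : i = j <;> simp [hij, comm a]

theorem abs_pyAppendAt (a : Array (Array Int)) (i x : Int) :
    absA (pyAppendAt a i x) = pyAppendAtL (absA a) i x := by
  unfold pyAppendAt pyAppendAtL absA
  simp only [Array.toList_modify, Array.length_toList, List.length_map]
  rw [map_modify Array.toList (fun l => l.push x) (fun l => l ++ [x])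
    (fun l => by simp)]

theorem foldl_hom' {α β γ : Type} (f : α → β) (g : α → γ → α) (h : β → γ → β)
    (H : ∀ a x, f (g a x) = h (f a) x) :
    ∀ (l : List γ) (a : α), f (l.foldl g a) = l.foldl h (f a) := by
  intro l
  induction l with
  | nil => intro a; rfl
  | cons x xs ih => intro a; simp only [List.foldl_cons, ih, H]

-- A's array computation, read back as the List computation the main lemmas analyse.
theorem build_broom_as_list (s p : Int) :
    build_broom s p = (1 + s + p,
      ((PySem.List.pyRange (s+1) (1+s+p) 1).foldl
        (fun (st : List (List Int) × Int) i =>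
          (pyAppendAtL (pyAppendAtL st.1 st.2 i) i st.2, i))
        (((PySem.List.pyRange 1 (s+1) 1).foldl
          (fun adj i => pyAppendAtL (pyAppendAtL adj 0 i) i 0)
          ((PySem.List.pyRange 0 (1+s+p) 1).map (fun _ => ([] : List Int)))), 0)).1) := by
  unfold build_broom
  refine Prod.ext rfl ?_
  show absA _ = _
  have hpath := foldl_hom' (fun (st : Array (Array Int) × Int) => (absA st.1, st.2))
    (fun st i => (pyAppendAt (pyAppendAt st.1 st.2 i) i st.2, i))
    (fun st i => (pyAppendAtL (pyAppendAtL st.1 st.2 i) i st.2, i))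
    (fun st i => by simp [abs_pyAppendAt])
    (PySem.List.pyRange (s+1) (1+s+p) 1)
  have hstar := foldl_hom' absA
    (fun adj i => pyAppendAt (pyAppendAt adj 0 i) i 0)
    (fun adj i => pyAppendAtL (pyAppendAtL adj 0 i) i 0)
    (fun adj i => by simp [abs_pyAppendAt])
    (PySem.List.pyRange 1 (s+1) 1)
  have hinit : absA (((PySem.List.pyRange 0 (1+s+p) 1).map (fun _ => (#[] : Array Int))).toArray)
      = (PySem.List.pyRange 0 (1+s+p) 1).map (fun _ => ([] : List Int)) := by
    simp [absA, List.map_map, Function.comp]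
  have h1 := congrArg Prod.fst (hpath
    (((PySem.List.pyRange 1 (s+1) 1).foldl
        (fun adj i => pyAppendAt (pyAppendAt adj 0 i) i 0)
        (((PySem.List.pyRange 0 (1+s+p) 1).map (fun _ => (#[] : Array Int))).toArray)), 0))
  simp only [] at h1
  rw [h1, hstar, hinit]

-- The whole of A's construction as one fold of single appends over an op list.
def appOps (ops : List (Int × Int)) (adj : List (List Int)) : List (List Int) :=
  ops.foldl (fun a op => pyAppendAtL a op.1 op.2) adj

theorem length_pyAppendAtL (adj : List (List Int)) (i x : Int) :
    (pyAppendAtL adj i x).length = adj.length := by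
  simp [pyAppendAtL, List.length_modify]

theorem getD_pyAppendAtL (adj : List (List Int)) (i x : Int) (h0 : 0 ≤ i)
    (h1 : i < (adj.length : Int)) (j : Nat) :
    (pyAppendAtL adj i x).getD j [] =
      if i = (j : Int) then adj.getD j [] ++ [x] else adj.getD j [] := by
  unfold pyAppendAtL
  rw [if_neg (by omega)]
  simp only [List.getD_eq_getElem?_getD, List.getElem?_modify]
  cases hj : adj[j]? with
  | none =>
      have hlen : adj.length ≤ j := List.getElem?_eq_none_iff.mp hj
      rw [if_neg (by omega)]
      rfl
  | some l =>
      by_cases hji : i = (j : Int)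
      · rw [if_pos hji]
        have : i.toNat = j := by omega
        simp [this]
      · rw [if_neg hji]
        have : ¬ i.toNat = j := by omega
        simp [this]

theorem length_appOps (ops : List (Int × Int)) (adj : List (List Int)) :
    (appOps ops adj).length = adj.length := by
  induction ops generalizing adj with
  | nil => rfl
  | cons op rest ih => simp [appOps, List.foldl_cons] at ih ⊢; rw [ih, length_pyAppendAtL]

-- Each slot of the final array is its initial value followed by the ops aimed at it, in order.
theorem getD_appOps (ops : List (Int × Int)) (adj : List (List Int))
    (h : ∀ op ∈ ops, 0 ≤ op.1 ∧ op.1 < (adj.length : Int)) (j : Nat) :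
    (appOps ops adj).getD j [] =
      adj.getD j [] ++ (ops.filter (fun op => op.1 == (j : Int))).map Prod.snd := by
  induction ops generalizing adj with
  | nil => simp [appOps]
  | cons op rest ih =>
      have h0 := h op List.mem_cons_self
      have hrest : ∀ o ∈ rest, 0 ≤ o.1 ∧ o.1 < ((pyAppendAtL adj op.1 op.2).length : Int) := by
        intro o ho
        rw [length_pyAppendAtL]
        exact h o (List.mem_cons_of_mem _ ho)
      show (appOps rest (pyAppendAtL adj op.1 op.2)).getD j [] = _
      rw [ih _ hrest, getD_pyAppendAtL _ _ _ h0.1 h0.2, List.filter_cons]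
      by_cases hj : op.1 = (j : Int) <;>
        simp [hj, beq_iff_eq, List.append_assoc]

-- A loop body doing two appends per element is the fold of single appends over the flatMap.
theorem foldl_two {α : Type} (f1 f2 : α → Int × Int) :
    ∀ (l : List α) (adj : List (List Int)),
      l.foldl (fun a x => pyAppendAtL (pyAppendAtL a (f1 x).1 (f1 x).2) (f2 x).1 (f2 x).2) adj
        = appOps (l.flatMap fun x => [f1 x, f2 x]) adj := by
  intro l
  induction l with
  | nil => intro adj; rfl
  | cons x xs ih => intro adj; simp [appOps, List.foldl_cons] at ih ⊢; exact ih _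

-- A fold carrying the previous element equals a fold over the zip of the chain with its tail.
theorem foldl_carry_zip {σ : Type} (g : σ → Int → Int → σ) :
    ∀ (l : List Int) (a : Int) (acc : σ),
      (l.foldl (fun st i => (g st.1 st.2 i, i)) (acc, a)).1
        = ((a :: l).zip l).foldl (fun st uv => g st uv.1 uv.2) acc := by
  intro l
  induction l with
  | nil => intro a acc; simp
  | cons x xs ih =>
      intro a acc
      simpa using ih x (g acc a x)

-- flatMap respects pointwise equality on the list's members.
theorem flatMap_congr_mem {α β : Type} (l : List α) (f g : α → List β)
    (h : ∀ x ∈ l, f x = g x) : l.flatMap f = l.flatMap g := by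
  induction l with
  | nil => rfl
  | cons x xs ih =>
      simp only [List.flatMap_cons, h x List.mem_cons_self]
      rw [ih (fun y hy => h y (List.mem_cons_of_mem _ hy))]

-- The consecutive pairs of c' :: range(c, b) in closed form.
theorem zip_chain : ∀ (k : Nat) (b c c' : Int), (b - c).toNat = k →
    (c' :: PySem.List.pyRange c b 1).zip (PySem.List.pyRange c b 1)
      = (PySem.List.pyRange c b 1).map (fun i => ((if i = c then c' else i - 1), i)) := by
  intro k
  induction k with
  | zero =>
      intro b c c' hk
      rw [PySem.List.pyRange_one_eq_nil (by omega)]; rfl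
  | succ m ih =>
      intro b c c' hk
      rw [PySem.List.pyRange_one_cons (by omega)]
      have ihc := ih b (c + 1) c (by omega)
      simp only [List.zip_cons_cons, List.map_cons]
      rw [ihc]
      refine congrArg₂ List.cons (by simp) ?_
      refine List.map_congr_left ?_
      intro i hi
      rw [PySem.List.mem_pyRange_one] at hi
      by_cases h1 : i = c + 1
      · subst h1
        rw [if_pos rfl, if_neg (by omega)]
        simp
      · rw [if_neg h1, if_neg (by omega)]

-- flatMap of a function that is [] on every element of the list.
theorem flatMap_nil_of_forall {α β : Type} (l : List α) (f : α → List β)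
    (h : ∀ x ∈ l, f x = []) : l.flatMap f = [] := by
  induction l with
  | nil => rfl
  | cons x xs ih =>
      simp [List.flatMap_cons, h x List.mem_cons_self,
        ih (fun y hy => h y (List.mem_cons_of_mem _ hy))]

-- filter-then-project of a two-element op list, as two if's.
theorem filter_pair (a1 b1 a2 b2 j : Int) :
    ((([(a1, b1), (a2, b2)] : List (Int × Int)).filter (fun op => op.1 == j)).map Prod.snd)
      = (if a1 = j then [b1] else []) ++ (if a2 = j then [b2] else []) := by
  by_cases h1 : a1 = j <;> by_cases h2 : a2 = j <;>
    simp [List.filter_cons, beq_iff_eq, h1, h2]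

-- flatMap over range(a,b) of a function supported on one point t.
theorem flatMap_range_single (a b t : Int) (u : List Int) (f : Int → List Int)
    (ht : a ≤ t) (hf : ∀ i, a ≤ i → i < b → f i = if i = t then u else []) :
    (PySem.List.pyRange a b 1).flatMap f = if t < b then u else [] := by
  by_cases hb : t < b
  · rw [PySem.List.pyRange_one_append a t b ht (by omega),
      PySem.List.pyRange_one_cons hb]
    rw [if_pos hb]
    simp only [List.flatMap_append, List.flatMap_cons]
    rw [flatMap_nil_of_forall _ f (fun i hi => by
        rw [PySem.List.mem_pyRange_one] at hi
        rw [hf i (by omega) (by omega), if_neg (by omega)]),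
      flatMap_nil_of_forall _ f (fun i hi => by
        rw [PySem.List.mem_pyRange_one] at hi
        rw [hf i (by omega) (by omega), if_neg (by omega)]),
      hf t ht hb, if_pos rfl]
    simp
  · rw [if_neg hb]
    exact flatMap_nil_of_forall _ f (fun i hi => by
      rw [PySem.List.mem_pyRange_one] at hi
      rw [hf i (by omega) (by omega), if_neg (by omega)])

-- flatMap over range(a,b) of a function supported on two points t and t+1.
theorem flatMap_range_double (a b t : Int) (u v : List Int) (f : Int → List Int)
    (ht : a ≤ t) (htb : t < b)
    (hf : ∀ i, a ≤ i → i < b → f i = if i = t then u else if i = t + 1 then v else []) :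
    (PySem.List.pyRange a b 1).flatMap f = u ++ (if t + 1 < b then v else []) := by
  rw [PySem.List.pyRange_one_append a (t+1) b (by omega) (by omega),
    PySem.List.pyRange_one_succ_right ht]
  simp only [List.flatMap_append, List.flatMap_cons, List.flatMap_nil]
  rw [flatMap_nil_of_forall _ f (fun i hi => by
      rw [PySem.List.mem_pyRange_one] at hi
      rw [hf i (by omega) (by omega), if_neg (by omega), if_neg (by omega)]),
    hf t ht htb, if_pos rfl,
    flatMap_range_single (t+1) b (t+1) v f (le_refl _) (fun i hi1 hi2 => by
      rw [hf i (by omega) (by omega), if_neg (by omega)])]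
  simp

-- nonnegative case: the heart of the proof
theorem build_broom_eq_alt_nonneg (s p : Int) (hs : 0 ≤ s) (hp : 0 ≤ p) :
    build_broom s p = build_broom_alt s p := by
  rw [build_broom_as_list]
  unfold build_broom_alt
  simp only []
  refine Prod.ext rfl ?_
  set n : Int := 1 + s + p with hn
  have hA : (((PySem.List.pyRange (s+1) n 1).foldl
      (fun (st : List (List Int) × Int) i =>
        (pyAppendAtL (pyAppendAtL st.1 st.2 i) i st.2, i))
      (((PySem.List.pyRange 1 (s+1) 1).foldl
        (fun adj i => pyAppendAtL (pyAppendAtL adj 0 i) i 0)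
        ((PySem.List.pyRange 0 n 1).map (fun _ => ([] : List Int)))), 0)).1)
      = appOps
          (((PySem.List.pyRange 1 (s+1) 1).flatMap fun i => [((0:Int), i), (i, 0)])
            ++ ((PySem.List.pyRange (s+1) n 1).flatMap fun i =>
                  [((if i = s + 1 then (0:Int) else i - 1), i),
                   (i, (if i = s + 1 then (0:Int) else i - 1))]))
          ((PySem.List.pyRange 0 n 1).map (fun _ => ([] : List Int))) := by
    rw [foldl_carry_zip (fun adj u v => pyAppendAtL (pyAppendAtL adj u v) v u),
      zip_chain (n - (s+1)).toNat n (s+1) 0 rfl]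
    rw [List.foldl_map]
    have h2 := foldl_two (α := Int)
      (fun i => ((if i = s + 1 then (0:Int) else i - 1), i))
      (fun i => (i, (if i = s + 1 then (0:Int) else i - 1)))
      (PySem.List.pyRange (s+1) n 1)
    simp only [] at h2
    rw [h2, foldl_two (α := Int) (fun i => ((0:Int), i)) (fun i => (i, 0))]
    simp [appOps, List.foldl_append]
  rw [hA]
  set ops : List (Int × Int) :=
      ((PySem.List.pyRange 1 (s+1) 1).flatMap fun i => [((0:Int), i), (i, 0)])
        ++ ((PySem.List.pyRange (s+1) n 1).flatMap fun i =>
              [((if i = s + 1 then (0:Int) else i - 1), i),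
               (i, (if i = s + 1 then (0:Int) else i - 1))]) with hops
  have hlen0 : ((PySem.List.pyRange 0 n 1).map (fun _ => ([] : List Int))).length
      = n.toNat := by
    rw [List.length_map, PySem.List.length_pyRange_one]
    omega
  have hn1 : (1:Int) ≤ n := by omega
  have hbound : ∀ op ∈ ops,
      0 ≤ op.1 ∧ op.1 < ((((PySem.List.pyRange 0 n 1).map (fun _ => ([] : List Int))).length : Nat) : Int) := by
    intro op hop
    rw [hlen0]
    have hcast : ((n.toNat : Nat) : Int) = n := by omega
    rw [hcast]
    rw [hops] at hop
    rcases List.mem_append.1 hop with h | h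
    · rw [List.mem_flatMap] at h
      obtain ⟨i, hi, hmem⟩ := h
      rw [PySem.List.mem_pyRange_one] at hi
      simp only [List.mem_cons, List.mem_singleton, List.not_mem_nil] at hmem
      rcases hmem with rfl | rfl | hF
      · exact ⟨le_refl 0, by omega⟩
      · exact ⟨by omega, by omega⟩
      · cases hF
    · rw [List.mem_flatMap] at h
      obtain ⟨i, hi, hmem⟩ := h
      rw [PySem.List.mem_pyRange_one] at hi
      simp only [List.mem_cons, List.mem_singleton, List.not_mem_nil] at hmem
      rcases hmem with rfl | rfl | hF
      · by_cases hie : i = s + 1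
        · rw [if_pos hie]; exact ⟨le_refl 0, by omega⟩
        · rw [if_neg hie]; exact ⟨by omega, by omega⟩
      · exact ⟨by omega, by omega⟩
      · cases hF
  apply List.ext_getElem
  · rw [length_appOps, hlen0, List.length_map, PySem.List.length_pyRange_one]
    omega
  · intro j hj1 hj2
    rw [length_appOps, hlen0] at hj1
    have hjn : (j : Int) < n := by omega
    have hL : (appOps ops ((PySem.List.pyRange 0 n 1).map (fun _ => ([] : List Int))))[j]'(by rwa [length_appOps, hlen0])
        = (appOps ops ((PySem.List.pyRange 0 n 1).map (fun _ => ([] : List Int)))).getD j [] := by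
      rw [List.getD_eq_getElem?_getD, List.getElem?_eq_getElem (by rwa [length_appOps, hlen0])]
      rfl
    rw [hL, getD_appOps ops _ hbound j]
    have hinit : ((PySem.List.pyRange 0 n 1).map (fun _ => ([] : List Int))).getD j []
        = [] := by
      rw [List.getD_eq_getElem?_getD, List.getElem?_map]
      cases (PySem.List.pyRange 0 n 1)[j]? <;> rfl
    rw [hinit, List.nil_append]
    rw [List.getElem_map, PySem.List.getElem_pyRange_one]
    simp only [zero_add]
    rw [hops, List.filter_append, List.map_append, List.filter_flatMap,
      List.filter_flatMap, List.map_flatMap, List.map_flatMap]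
    have hstar_inner : ∀ i : Int,
        ((([((0:Int), i), (i, 0)]).filter (fun op => op.1 == (j:Int))).map Prod.snd)
          = (if (0:Int) = (j:Int) then [i] else []) ++ (if i = (j:Int) then [(0:Int)] else []) :=
      fun i => filter_pair 0 i i 0 (j:Int)
    have hpath_inner : ∀ i : Int,
        ((([((if i = s + 1 then (0:Int) else i - 1), i),
            (i, (if i = s + 1 then (0:Int) else i - 1))]).filter
            (fun op => op.1 == (j:Int))).map Prod.snd)
          = (if (if i = s + 1 then (0:Int) else i - 1) = (j:Int) then [i] else [])
            ++ (if i = (j:Int) then [(if i = s + 1 then (0:Int) else i - 1)] else []) :=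
      fun i => filter_pair _ i i _ (j:Int)
    by_cases hj0 : (j : Int) = 0
    · -- hub
      rw [if_pos hj0]
      have hstar : ((PySem.List.pyRange 1 (s+1) 1).flatMap fun i =>
          ((([((0:Int), i), (i, 0)]).filter (fun op => op.1 == (j:Int))).map Prod.snd))
          = PySem.List.pyRange 1 (s+1) 1 := by
        rw [flatMap_congr_mem _ _ (fun i => [i]) (fun i hi => by
          rw [PySem.List.mem_pyRange_one] at hi
          rw [hstar_inner i, if_pos (show (0:Int) = (j:Int) from hj0.symm),
            if_neg (show ¬ i = (j:Int) by omega), List.append_nil])]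
        simp
      rw [hstar]
      refine congrArg _ ?_
      rw [flatMap_congr_mem _ _ (fun i => if i = s + 1 then [s+1] else []) (fun i hi => by
          rw [PySem.List.mem_pyRange_one] at hi
          rw [hpath_inner i]
          by_cases hie : i = s + 1
          · subst hie
            simp [hj0] <;> omega
          · simp [hie, hj0] <;> omega)]
      rw [flatMap_range_single (s+1) n (s+1) [s+1] _ (le_refl _)
        (fun i hi1 hi2 => rfl)]
      by_cases hp1 : p ≥ 1
      · rw [if_pos (show s + 1 < n by omega), if_pos hp1]
      · rw [if_neg (show ¬ s + 1 < n by omega), if_neg hp1]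
    · rw [if_neg hj0]
      have hj1' : (1:Int) ≤ (j:Int) := by omega
      by_cases hjs : (j : Int) ≤ s
      · -- leaf
        rw [if_pos hjs]
        have hpath : ((PySem.List.pyRange (s+1) n 1).flatMap fun i =>
            ((([((if i = s + 1 then (0:Int) else i - 1), i),
                (i, (if i = s + 1 then (0:Int) else i - 1))]).filter
                (fun op => op.1 == (j:Int))).map Prod.snd)) = [] := by
          refine flatMap_nil_of_forall _ _ (fun i hi => ?_)
          rw [PySem.List.mem_pyRange_one] at hi
          rw [hpath_inner i]
          by_cases hie : i = s + 1
          · subst hie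
            simp [show (0:Int) ≠ (j:Int) by omega, show (s + 1 : Int) ≠ (j:Int) by omega] <;> omega
          · simp [hie, show i - 1 ≠ (j:Int) by omega, show i ≠ (j:Int) by omega] <;> omega
        rw [hpath, List.append_nil]
        rw [flatMap_congr_mem _ _ (fun i => if i = (j:Int) then [(0:Int)] else []) (fun i hi => by
            rw [PySem.List.mem_pyRange_one] at hi
            rw [hstar_inner i, if_neg (show ¬ (0:Int) = (j:Int) by omega), List.nil_append])]
        rw [flatMap_range_single 1 (s+1) (j:Int) [(0:Int)] _ hj1'
          (fun i hi1 hi2 => rfl), if_pos (by omega)]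
      · -- path vertex: s + 1 ≤ j < n
        rw [if_neg hjs]
        have hjs1 : s + 1 ≤ (j:Int) := by omega
        have hstar : ((PySem.List.pyRange 1 (s+1) 1).flatMap fun i =>
            ((([((0:Int), i), (i, 0)]).filter (fun op => op.1 == (j:Int))).map Prod.snd))
            = [] := by
          refine flatMap_nil_of_forall _ _ (fun i hi => ?_)
          rw [PySem.List.mem_pyRange_one] at hi
          rw [hstar_inner i, if_neg (show ¬ (0:Int) = (j:Int) by omega),
            if_neg (show ¬ i = (j:Int) by omega)]; rfl
        rw [hstar, List.nil_append]
        rw [flatMap_congr_mem _ _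
          (fun i => if i = (j:Int) then [(if (j:Int) = s + 1 then (0:Int) else (j:Int) - 1)]
                    else if i = (j:Int) + 1 then [(j:Int)+1] else []) (fun i hi => by
            rw [PySem.List.mem_pyRange_one] at hi
            rw [hpath_inner i]
            by_cases hie : i = (j:Int)
            · subst hie
              by_cases h2 : (j:Int) = s + 1
              · simp [h2] <;> omega
              · simp [h2] <;> omega
            · by_cases hie1 : i = (j:Int) + 1
              · subst hie1
                simp [show (j:Int) + 1 ≠ s + 1 by omega, hie,
                  show (j:Int) + 1 - 1 = (j:Int) by omega] <;> omega
              · by_cases hie2 : i = s + 1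
                · subst hie2
                  simp [hie, hie1] <;> omega
                · simp [hie2, hie, hie1, show i - 1 ≠ (j:Int) by omega] <;> omega)]
        rw [flatMap_range_double (s+1) n (j:Int)
          [(if (j:Int) = s + 1 then (0:Int) else (j:Int) - 1)] [(j:Int)+1] _
          hjs1 hjn (fun i hi1 hi2 => rfl)]
        by_cases hlast : (j:Int) + 1 < n
        · rw [if_pos hlast, if_pos (show (j:Int) < n - 1 by omega)]
          rfl
        · rw [if_neg hlast, if_neg (show ¬ (j:Int) < n - 1 by omega)]
          rfl

-- degenerate case: both counts nonpositive
theorem build_broom_eq_alt_nonpos (s p : Int) (hs : s ≤ 0) (hp : p ≤ 0) :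
    build_broom s p = build_broom_alt s p := by
  by_cases hz : s = 0 ∧ p = 0
  · obtain ⟨rfl, rfl⟩ := hz; decide
  · rw [build_broom_as_list]
    unfold build_broom_alt
    simp only []
    rw [PySem.List.pyRange_one_eq_nil (show 1 + s + p ≤ 0 by omega),
      PySem.List.pyRange_one_eq_nil (show s + 1 ≤ 1 by omega),
      PySem.List.pyRange_one_eq_nil (show 1 + s + p ≤ s + 1 by omega)]
    rfl

-- ===== VERDICT (by name: the statement is the Claim_ definition above) =====
theorem build_broom_spec : Claim_equal_build_broom := by
  intro s p _ hpre
  unfold Spec_build_broom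
  rcases hpre with ⟨hs, hp⟩ | ⟨hs, hp⟩
  · exact build_broom_eq_alt_nonneg s p hs hp
  · exact build_broom_eq_alt_nonpos s p hs hp
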